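-- pv_equiv track=rewrite | github.com/13-Characters/advent-of-code-2023 | day17/part1.py | evalPath
-- ===== SOURCE A (Python) =====
-- def evalPath(startingPosition: tuple, instructions: str):
--     # F = forwards, L = turn left, R = turn right
--     result = [startingPosition]
--     # 0=north, 1=east, 2=south, 3=west
--     if instructions[0] == "E": direction = 1
--     if instructions[0] == "S": direction = 2
--     vectors = [(0, -1), (1, 0), (0, 1), (-1, 0)]
--     for char in instructions[1:]:
--         x, dx = result[-1][0], vectors[direction][0]
--         y, dy = result[-1][1], vectors[direction][1]
--         if char == "F":
--             result.append((x + dx, y + dy))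
--         if char == "L":
--             direction = (direction - 1) % 4
--         if char == "R":
--             direction = (direction + 1) % 4
--     return result
-- ===== SOURCE B (Python) =====
-- VECTORS = [(0, -1), (1, 0), (0, 1), (-1, 0)]
--
-- def evalPath(startingPosition: tuple, instructions: str):
--     body = instructions[1:]
--     d0 = 1 if instructions[0] == "E" else 2 if instructions[0] == "S" else 0
--     # pass 1: net turn count in force at each instruction (running sum of R=+1, L=-1)
--     dirs = []
--     d = d0
--     for c in body:
--         dirs.append(d)
--         d += 1 if c == "R" else -1 if c == "L" else 0
--     # pass 2: the unit step taken at each 'F'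
--     steps = [VECTORS[d % 4] for c, d in zip(body, dirs) if c == "F"]
--     # pass 3: prefix-sum the steps onto the start position
--     x, y = startingPosition
--     result = [startingPosition]
--     for dx, dy in steps:
--         x, y = x + dx, y + dy
--         result.append((x, y))
--     return result
-- ===== Notes on version B (the rewrite author's own statement) =====
-- stated objective: alternative
-- what changed: B replaces A's single-pass simulation carrying a mod-4 direction state with a staged pipeline: first a running turn count per instruction, then a filtered list of unit steps at the 'F' positions, then a prefix-sum of those steps onto the start position.
import Mathlib
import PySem

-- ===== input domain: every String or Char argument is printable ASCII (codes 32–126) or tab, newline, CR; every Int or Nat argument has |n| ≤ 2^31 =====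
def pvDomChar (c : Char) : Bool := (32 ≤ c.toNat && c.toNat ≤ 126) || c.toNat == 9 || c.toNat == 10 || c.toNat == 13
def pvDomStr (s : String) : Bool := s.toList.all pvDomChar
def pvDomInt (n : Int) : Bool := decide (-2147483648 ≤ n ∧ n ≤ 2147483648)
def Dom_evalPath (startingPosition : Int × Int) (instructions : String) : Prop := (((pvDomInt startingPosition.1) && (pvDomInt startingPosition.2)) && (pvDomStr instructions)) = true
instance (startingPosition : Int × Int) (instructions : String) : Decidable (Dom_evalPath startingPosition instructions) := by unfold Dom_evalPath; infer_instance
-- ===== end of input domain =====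

-- B replaces A's single-pass simulation with mutable direction state by a staged pipeline
-- (running turn counts, then the 'F' steps, then a prefix-sum of the steps); objective:
-- alternative decomposition, same O(n) cost.

-- ===== PORT A =====
def evalPathVecs : List (Int × Int) := [(0, -1), (1, 0), (0, 1), (-1, 0)]

def evalPathLoop (cs : List Char) (result : List (Int × Int)) (direction : Int) : List (Int × Int) :=
  match cs with
  | [] => result
  | c :: rest =>
    let last := result.getLast!
    -- direction is always in 0..3 inside Pre_, so the .getD default is never used there
    let v := (PySem.List.pyGet? evalPathVecs direction).getD (0, 0)
    let result' := if c = 'F' then result ++ [(last.1 + v.1, last.2 + v.2)] else result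
    let direction' :=
      if c = 'L' then PySem.Int.mod (direction - 1) 4
      else if c = 'R' then PySem.Int.mod (direction + 1) 4
      else direction
    evalPathLoop rest result' direction'

def evalPath (startingPosition : Int × Int) (instructions : String) : List (Int × Int) :=
  -- Python A leaves `direction` unbound when the first char is neither 'E' nor 'S';
  -- Pre_ excludes every input on which that unbound variable is read, so the 0 is never used there
  evalPathLoop (instructions.toList.drop 1) [startingPosition]
    (if instructions.toList.head? = some 'E' then 1
     else if instructions.toList.head? = some 'S' then 2 else 0)

-- ===== PORT B =====
-- pass 1: running turn count in force at each instruction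
def evalPathDirs (cs : List Char) (d : Int) : List Int :=
  match cs with
  | [] => []
  | c :: rest => d :: evalPathDirs rest (d + (if c = 'R' then 1 else if c = 'L' then -1 else 0))

-- pass 3: prefix-sum the steps onto the start position
def evalPathWalk (steps : List (Int × Int)) (x y : Int) : List (Int × Int) :=
  match steps with
  | [] => []
  | (dx, dy) :: rest => (x + dx, y + dy) :: evalPathWalk rest (x + dx) (y + dy)

def evalPath_alt (startingPosition : Int × Int) (instructions : String) : List (Int × Int) :=
  let body := instructions.toList.drop 1
  let d0 : Int := if instructions.toList.head? = some 'E' then 1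
                  else if instructions.toList.head? = some 'S' then 2 else 0
  let dirs := evalPathDirs body d0
  -- pass 2: the unit step taken at each 'F' (d % 4 is always in range, so .getD is never used)
  let steps := (body.zip dirs).filterMap
    (fun p => if p.1 = 'F'
              then some ((PySem.List.pyGet? evalPathVecs (PySem.Int.mod p.2 4)).getD (0, 0))
              else none)
  startingPosition :: evalPathWalk steps startingPosition.1 startingPosition.2

-- ===== PRECONDITION & SPEC =====
-- Pre_ excludes exactly the inputs where Python A raises: the empty string (IndexError) and
-- strings of length ≥ 2 whose first char is neither 'E' nor 'S' (UnboundLocalError: `direction`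
-- is read unbound on the first loop iteration).
def Pre_evalPath (startingPosition : Int × Int) (instructions : String) : Prop :=
  instructions.toList ≠ [] ∧
    (instructions.toList.head? = some 'E' ∨ instructions.toList.head? = some 'S' ∨
      instructions.toList.length = 1)
instance (startingPosition : Int × Int) (instructions : String) : Decidable (Pre_evalPath startingPosition instructions) := by unfold Pre_evalPath; infer_instance

def pvWitness_evalPath : (Int × Int) × String := ((0, 0), "EFLF")

def Spec_evalPath (startingPosition : Int × Int) (instructions : String) (out : List (Int × Int)) : Prop := out = evalPath_alt startingPosition instructions
instance (startingPosition : Int × Int) (instructions : String) (out : List (Int × Int)) : Decidable (Spec_evalPath startingPosition instructions out) := by unfold Spec_evalPath; infer_instance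

-- ===== CLAIM =====
def Claim_equal_evalPath : Prop := ∀ (startingPosition : Int × Int) (instructions : String), Dom_evalPath startingPosition instructions → Pre_evalPath startingPosition instructions → Spec_evalPath startingPosition instructions (evalPath startingPosition instructions)

-- ===== LEMMAS AND PROOFS =====

lemma mod4_pos : (0:Int) < 4 := by norm_num

lemma mod4_sub_one (d : Int) : PySem.Int.mod (PySem.Int.mod d 4 - 1) 4 = PySem.Int.mod (d + -1) 4 := by
  simp only [PySem.Int.mod_eq_emod_of_pos mod4_pos]; omega

lemma mod4_add_one (d : Int) : PySem.Int.mod (PySem.Int.mod d 4 + 1) 4 = PySem.Int.mod (d + 1) 4 := by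
  simp only [PySem.Int.mod_eq_emod_of_pos mod4_pos]; omega

-- the bridge: A's loop with direction (d % 4) equals appending B's staged walk from res's last
lemma loop_eq (cs : List Char) (res : List (Int × Int)) (d : Int) (pos : Int × Int)
    (hpos : res.getLast? = some pos) :
    evalPathLoop cs res (PySem.Int.mod d 4) =
      res ++ evalPathWalk
        ((cs.zip (evalPathDirs cs d)).filterMap
          (fun p => if p.1 = 'F'
                    then some ((PySem.List.pyGet? evalPathVecs (PySem.Int.mod p.2 4)).getD (0, 0))
                    else none))
        pos.1 pos.2 := by
  induction cs generalizing res d pos with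
  | nil => simp [evalPathLoop, evalPathDirs, evalPathWalk]
  | cons c rest ih =>
      by_cases hF : c = 'F'
      · subst hF
        simp only [evalPathLoop]
        simp only [show (('F':Char) = 'L') = False from by decide,
                   show (('F':Char) = 'R') = False from by decide, if_false, if_true,
                   List.getLast!_eq_getLast?_getD, hpos, Option.getD_some]
        rw [ih (res ++ [(pos.1 + ((PySem.List.pyGet? evalPathVecs (PySem.Int.mod d 4)).getD (0, 0)).1,
                         pos.2 + ((PySem.List.pyGet? evalPathVecs (PySem.Int.mod d 4)).getD (0, 0)).2)])
              d _ List.getLast?_concat]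
        simp [evalPathDirs, evalPathWalk]
      · by_cases hL : c = 'L'
        · subst hL
          simp only [evalPathLoop]
          simp only [show (('L':Char) = 'F') = False from by decide, if_false, if_true,
                     mod4_sub_one]
          rw [ih res (d + -1) pos hpos]
          simp [evalPathDirs]
        · by_cases hR : c = 'R'
          · subst hR
            simp only [evalPathLoop]
            simp only [show (('R':Char) = 'F') = False from by decide,
                       show (('R':Char) = 'L') = False from by decide, if_false, if_true,
                       mod4_add_one]
            rw [ih res (d + 1) pos hpos]
            simp [evalPathDirs]
          · simp only [evalPathLoop, if_neg hF, if_neg hL, if_neg hR]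
            rw [ih res d pos hpos]
            simp [evalPathDirs, hF, hL, hR]

-- ===== VERDICT =====
theorem evalPath_spec : Claim_equal_evalPath := by
  intro sp ins _ hPre
  obtain ⟨hne, _⟩ := hPre
  unfold Spec_evalPath evalPath evalPath_alt
  by_cases hE : ins.toList.head? = some 'E'
  · rw [if_pos hE]
    have : (1 : Int) = PySem.Int.mod 1 4 := by decide
    rw [this, loop_eq _ [sp] 1 sp rfl]
    simp
  · by_cases hS : ins.toList.head? = some 'S'
    · rw [if_neg hE, if_pos hS]
      have : (2 : Int) = PySem.Int.mod 2 4 := by decide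
      rw [this, loop_eq _ [sp] 2 sp rfl]
      simp
    · rw [if_neg hE, if_neg hS]
      have : (0 : Int) = PySem.Int.mod 0 4 := by decide
      rw [this, loop_eq _ [sp] 0 sp rfl]
      simp
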